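-- pv_equiv track=rewrite | github.com/FinRae/Advent-Of-Code | Advent-Of-Code-2022/Day10/Day10.py | addxFunc
-- ===== SOURCE A (Python) =====
-- def addxFunc(cycle, X, amount):
--     tempCycles = []
--     for i in range(2):
--         cycle += 1
--         if i == 1:
--             X += amount
--         tempCycles.append([cycle, X])
--     return cycle, X , tempCycles
-- ===== SOURCE B (Python) =====
-- def addxFunc(cycle, X, amount):
--     # An addx is a sequence of per-cycle X deltas: [0, amount].  Recursively
--     # consume the deltas, consing each snapshot onto the recursion's result.
--     def run(cycle, X, deltas):
--         if not deltas:
--             return cycle, X, []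
--         c2 = cycle + 1
--         x2 = X + deltas[0]
--         fc, fx, rest = run(c2, x2, deltas[1:])
--         return fc, fx, [[c2, x2]] + rest
--     return run(cycle, X, [0, amount])
-- ===== Notes on version B (the rewrite author's own statement) =====
-- stated objective: alternative
-- what changed: Replaced the imperative 2-iteration loop with mutable state and list append by a recursion over a per-cycle delta list [0, amount] that conses snapshots onto the recursive result.
import Mathlib
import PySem

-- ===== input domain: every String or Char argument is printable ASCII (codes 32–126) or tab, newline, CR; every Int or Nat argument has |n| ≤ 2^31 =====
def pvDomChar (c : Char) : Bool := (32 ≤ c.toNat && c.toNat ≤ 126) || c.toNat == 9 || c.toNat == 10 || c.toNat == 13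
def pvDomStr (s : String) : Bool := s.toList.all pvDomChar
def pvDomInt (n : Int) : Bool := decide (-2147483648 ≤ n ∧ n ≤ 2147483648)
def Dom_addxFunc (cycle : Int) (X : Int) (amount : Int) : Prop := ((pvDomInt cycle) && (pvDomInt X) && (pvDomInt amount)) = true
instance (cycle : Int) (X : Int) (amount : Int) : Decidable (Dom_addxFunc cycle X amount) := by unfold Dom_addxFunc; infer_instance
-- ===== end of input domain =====

-- B replaces A's imperative 2-iteration loop (mutable state, append) by a recursion
-- over the per-cycle delta list [0, amount] that conses snapshots onto the recursive
-- result (objective: alternative decomposition).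

-- ===== PORT A =====
-- A: fold the 2-iteration loop over range(2), same state (cycle, X, tempCycles)
def addxFunc (cycle : Int) (X : Int) (amount : Int) : Int × Int × List (List Int) :=
  (PySem.List.pyRange 0 2 1).foldl
    (fun st i =>
      let c := st.1 + 1
      let x := if i == 1 then st.2.1 + amount else st.2.1
      (c, x, st.2.2 ++ [[c, x]]))
    (cycle, X, ([] : List (List Int)))

-- ===== PORT B =====
-- B's inner 'run': recursion over the delta list, consing each snapshot
def addxRun (cycle : Int) (X : Int) : List Int → Int × Int × List (List Int)
  | [] => (cycle, X, [])
  | d :: ds =>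
    let c2 := cycle + 1
    let x2 := X + d
    let r := addxRun c2 x2 ds
    (r.1, r.2.1, [c2, x2] :: r.2.2)

def addxFunc_alt (cycle : Int) (X : Int) (amount : Int) : Int × Int × List (List Int) :=
  addxRun cycle X [0, amount]

-- ===== PRECONDITION & SPEC =====
def Spec_addxFunc (cycle : Int) (X : Int) (amount : Int) (out : Int × Int × List (List Int)) : Prop := out = addxFunc_alt cycle X amount
instance (cycle : Int) (X : Int) (amount : Int) (out : Int × Int × List (List Int)) : Decidable (Spec_addxFunc cycle X amount out) := by unfold Spec_addxFunc; infer_instance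

-- ===== CLAIM =====
def Claim_equal_addxFunc : Prop := ∀ (cycle : Int) (X : Int) (amount : Int), Dom_addxFunc cycle X amount → Spec_addxFunc cycle X amount (addxFunc cycle X amount)

-- ===== LEMMAS AND PROOFS =====

-- ===== VERDICT =====
theorem addxFunc_spec : Claim_equal_addxFunc := by
  intro cycle X amount _
  unfold Spec_addxFunc addxFunc addxFunc_alt addxRun
  simp [PySem.List.pyRange, List.range_succ, addxRun]
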